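-- pv_equiv track=rewrite | github.com/jang1563/BioProtocolBench | scripts/run_human_baseline_pilot.py | select_plan_rows
-- ===== SOURCE A (Python) =====
-- from typing import Any
--
-- def select_plan_rows(
--     rows: list[dict[str, Any]],
--     run_all: bool = False,
-- ) -> list[dict[str, Any]]:
--     in_progress = [row for row in rows if row["status"] == "in_progress"]
--     pending = [row for row in rows if row["status"] == "pending"]
--
--     if run_all:
--         return list(in_progress) + list(pending)
--
--     if in_progress:
--         return [in_progress[0]]
--     if pending:
--         return [pending[0]]
--     return []
-- ===== SOURCE B (Python) =====
-- def select_plan_rows(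
--     rows,
--     run_all=False,
-- ):
--     # Sort-based selection: keep only actionable rows, then stable-sort by
--     # priority (in_progress before pending); run_all takes the whole order,
--     # otherwise just its first element.
--     ordered = sorted(
--         (row for row in rows if row["status"] in ("in_progress", "pending")),
--         key=lambda row: row["status"] != "in_progress",
--     )
--     return ordered if run_all else ordered[:1]
-- ===== Notes on version B (the rewrite author's own statement) =====
-- stated objective: alternative
-- what changed: Replaces A's two filtering comprehensions plus a first-match branch chain with one filter of actionable rows followed by a stable sort on a status-priority key, returning the whole ordered list (run_all) or its first element (slice).
import Mathlib
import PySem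

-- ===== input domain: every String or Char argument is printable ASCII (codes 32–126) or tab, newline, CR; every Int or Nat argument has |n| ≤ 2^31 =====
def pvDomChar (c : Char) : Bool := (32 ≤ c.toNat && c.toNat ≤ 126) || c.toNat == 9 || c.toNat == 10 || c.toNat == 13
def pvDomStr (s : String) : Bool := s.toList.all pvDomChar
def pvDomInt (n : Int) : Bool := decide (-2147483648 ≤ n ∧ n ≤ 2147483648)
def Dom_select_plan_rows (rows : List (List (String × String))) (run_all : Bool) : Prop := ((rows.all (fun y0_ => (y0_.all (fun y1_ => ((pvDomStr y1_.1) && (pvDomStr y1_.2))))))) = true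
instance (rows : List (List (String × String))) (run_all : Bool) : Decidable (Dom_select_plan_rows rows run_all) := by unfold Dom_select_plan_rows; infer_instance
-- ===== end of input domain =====

-- B replaces A's two filtering comprehensions and first-match branch chain with one
-- filter of the actionable rows plus a stable sort on a status-priority key and a
-- uniform whole-list / first-element return (objective: alternative algorithm).

-- ===== PORT A =====
-- row["status"] raises KeyError when the key is missing; Pre_ excludes that, so the
-- lookup is ported as getD "" (exact on Pre_).
def select_plan_rows (rows : List (List (String × String))) (run_all : Bool) : List (List (String × String)) :=
  let in_progress := rows.filter (fun row => ((PySem.Dict.mk row).get? "status").getD "" == "in_progress")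
  let pending := rows.filter (fun row => ((PySem.Dict.mk row).get? "status").getD "" == "pending")
  if run_all then in_progress ++ pending
  else
    match in_progress with
    | r :: _ => [r]
    | [] =>
      match pending with
      | r :: _ => [r]
      | [] => []

-- ===== PORT B =====
-- the Python key row["status"] != "in_progress" is a bool, which Python sorts as the
-- int 0/1; ported as the Nat 0/1.  row["status"] ported as getD "" (exact on Pre_).
def select_plan_rows_alt (rows : List (List (String × String))) (run_all : Bool) : List (List (String × String)) :=
  let ordered := PySem.List.sorted
    (rows.filter (fun row =>
      let s := ((PySem.Dict.mk row).get? "status").getD ""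
      s == "in_progress" || s == "pending"))
    (fun row => if ((PySem.Dict.mk row).get? "status").getD "" != "in_progress" then (1 : Nat) else 0)
    false
  if run_all then ordered else ordered.take 1

-- ===== PRECONDITION & SPEC =====
-- Pre_ excludes rows without a "status" key, on which the Python row["status"] raises KeyError.
def Pre_select_plan_rows (rows : List (List (String × String))) (run_all : Bool) : Prop :=
  ∀ row ∈ rows, ((PySem.Dict.mk row).get? "status").isSome = true
instance (rows : List (List (String × String))) (run_all : Bool) : Decidable (Pre_select_plan_rows rows run_all) := by unfold Pre_select_plan_rows; infer_instance
def pvWitness_select_plan_rows : (List (List (String × String))) × Bool :=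
  ([[("status", "pending"), ("id", "1")], [("status", "done")]], false)

def Spec_select_plan_rows (rows : List (List (String × String))) (run_all : Bool) (out : List (List (String × String))) : Prop := out = select_plan_rows_alt rows run_all
instance (rows : List (List (String × String))) (run_all : Bool) (out : List (List (String × String))) : Decidable (Spec_select_plan_rows rows run_all out) := by unfold Spec_select_plan_rows; infer_instance

-- ===== CLAIM (what is proved, stated in full; the proofs are below) =====
def Claim_equal_select_plan_rows : Prop := ∀ (rows : List (List (String × String))) (run_all : Bool), Dom_select_plan_rows rows run_all → Pre_select_plan_rows rows run_all → Spec_select_plan_rows rows run_all (select_plan_rows rows run_all)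

-- ===== LEMMAS AND PROOFS =====

-- inserting a key-0 element into (zeros ++ ones) puts it right between the blocks
theorem insertBy_zero {α : Type} (key : α → Nat) (x : α) (hx : key x = 0)
    (A B : List α) (hA : ∀ a ∈ A, key a = 0) (hB : ∀ b ∈ B, key b = 1) :
    PySem.List.insertBy (fun a b => decide (key a < key b)) x (A ++ B) = A ++ x :: B := by
  induction A with
  | nil =>
    cases B with
    | nil => simp [PySem.List.insertBy]
    | cons b bs =>
      have : key b = 1 := hB b (by simp)
      simp [PySem.List.insertBy, hx, this]
  | cons a as ih =>
    have ha : key a = 0 := hA a (by simp)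
    simp only [List.cons_append, PySem.List.insertBy, hx, ha]
    simp [ih (fun a ha' => hA a (by simp [ha']))]

-- inserting a key-1 element at the end: nothing with a larger key exists
theorem insertBy_one {α : Type} (key : α → Nat) (x : α) (hx : key x = 1)
    (L : List α) (hL : ∀ y ∈ L, key y ≤ 1) :
    PySem.List.insertBy (fun a b => decide (key a < key b)) x L = L ++ [x] := by
  apply PySem.List.insertBy_of_forall_not_before
  intro y hy
  simp only [decide_eq_false_iff_not, not_lt, hx]
  exact hL y hy

-- the insertion-sort fold on a binary key produces zeros-block ++ ones-block, stably
theorem fold_part {α : Type} (key : α → Nat) :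
    ∀ (xs A B : List α), (∀ a ∈ A, key a = 0) → (∀ b ∈ B, key b = 1) → (∀ x ∈ xs, key x ≤ 1) →
    xs.foldl (fun acc x => PySem.List.insertBy (fun a b => decide (key a < key b)) x acc) (A ++ B)
      = (A ++ xs.filter (fun x => key x == 0)) ++ (B ++ xs.filter (fun x => key x == 1)) := by
  intro xs
  induction xs with
  | nil => intro A B _ _ _; simp
  | cons x rest ih =>
    intro A B hA hB hx
    have hx1 : key x ≤ 1 := hx x (by simp)
    simp only [List.foldl_cons, List.filter_cons]
    by_cases h0 : key x = 0
    · rw [insertBy_zero key x h0 A B hA hB]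
      have := ih (A ++ [x]) B
        (by intro a ha; rcases List.mem_append.mp ha with h | h
            · exact hA a h
            · simp at h; simp [h, h0])
        hB (fun y hy => hx y (by simp [hy]))
      simpa [h0] using this
    · have h1 : key x = 1 := by omega
      have hins : PySem.List.insertBy (fun a b => decide (key a < key b)) x (A ++ B)
          = A ++ (B ++ [x]) := by
        rw [← List.append_assoc]
        apply insertBy_one key x h1
        intro y hy
        rcases List.mem_append.mp hy with h | h
        · simp [hA y h]
        · simp [hB y h]
      rw [hins, ih A (B ++ [x]) hA
        (by intro b hb; rcases List.mem_append.mp hb with h | h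
            · exact hB b h
            · simp at h; simp [h, h1])
        (fun y hy => hx y (by simp [hy]))]
      simp [h1]

-- sorting on a 0/1 key = stable two-way partition
theorem sorted_binary {α : Type} (key : α → Nat) (xs : List α) (h : ∀ x ∈ xs, key x ≤ 1) :
    PySem.List.sorted xs key false
      = xs.filter (fun x => key x == 0) ++ xs.filter (fun x => key x == 1) := by
  rw [PySem.List.sorted_eq_foldl_insertBy]
  have := fold_part key xs [] [] (by simp) (by simp) h
  simpa using this

-- ===== VERDICT (by name: the statement is the Claim_ definition above) =====
theorem select_plan_rows_spec : Claim_equal_select_plan_rows := by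
  intro rows run_all _ _
  show select_plan_rows rows run_all = select_plan_rows_alt rows run_all
  simp only [select_plan_rows, select_plan_rows_alt]
  rw [sorted_binary _ _ (by intro x _; split <;> omega)]
  rw [List.filter_filter, List.filter_filter]
  have e0 : ∀ row : List (String × String),
      ((if (((PySem.Dict.mk row).get? "status").getD "" != "in_progress") = true then (1:Nat) else 0) == 0 &&
       (((PySem.Dict.mk row).get? "status").getD "" == "in_progress" ||
        ((PySem.Dict.mk row).get? "status").getD "" == "pending"))
      = (((PySem.Dict.mk row).get? "status").getD "" == "in_progress") := by
    intro row
    by_cases h : ((PySem.Dict.mk row).get? "status").getD "" = "in_progress" <;> simp [h]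
  have e1 : ∀ row : List (String × String),
      ((if (((PySem.Dict.mk row).get? "status").getD "" != "in_progress") = true then (1:Nat) else 0) == 1 &&
       (((PySem.Dict.mk row).get? "status").getD "" == "in_progress" ||
        ((PySem.Dict.mk row).get? "status").getD "" == "pending"))
      = (((PySem.Dict.mk row).get? "status").getD "" == "pending") := by
    intro row
    by_cases h : ((PySem.Dict.mk row).get? "status").getD "" = "in_progress"
    · simp [h]
    · by_cases h2 : ((PySem.Dict.mk row).get? "status").getD "" = "pending" <;> simp [h, h2]
  simp only [e0, e1]
  cases run_all with
  | true => simp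
  | false =>
    cases h : rows.filter (fun row => ((PySem.Dict.mk row).get? "status").getD "" == "in_progress") with
    | cons r t => simp
    | nil =>
      cases rows.filter (fun row => ((PySem.Dict.mk row).get? "status").getD "" == "pending") with
      | nil => simp
      | cons r t => simp
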